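-- pv_equiv track=rewrite | github.com/tomp/AOC-2017 | day21/day21.py | load_rule
-- ===== SOURCE A (Python) =====
-- def load_rule(input0, output):
--     """Load a single enhancement rule.
--     A dict mapping all matching input patterns to the given output
--     pattern is returned.
--     """
--     result = {input0: output}
--     pix = input0.split('/')
--     if len(pix) == 2:
--         for _ in range(3):
--             pix = [pix[0][1] + pix[1][1], pix[0][0] + pix[1][0]]
--             result["/".join(pix)] = output
--             vflip = [pix[1][0] + pix[1][1], pix[0][0] + pix[0][1]]
--             result["/".join(vflip)] = output
--             hflip = [pix[0][1] + pix[0][0], pix[1][1] + pix[1][0]]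
--             result["/".join(hflip)] = output
--     elif len(pix) == 3:
--         for _ in range(3):
--             pix = [pix[0][2] + pix[1][2] + pix[2][2],
--                    pix[0][1] + pix[1][1] + pix[2][1],
--                    pix[0][0] + pix[1][0] + pix[2][0]]
--             result["/".join(pix)] = output
--             vflip = [pix[2][0] + pix[2][1] + pix[2][2],
--                      pix[1][0] + pix[1][1] + pix[1][2],
--                      pix[0][0] + pix[0][1] + pix[0][2]]
--             result["/".join(vflip)] = output
--             hflip = [pix[0][2] + pix[0][1] + pix[0][0],
--                      pix[1][2] + pix[1][1] + pix[1][0],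
--                      pix[2][2] + pix[2][1] + pix[2][0]]
--             result["/".join(hflip)] = output
--     return result
-- ===== SOURCE B (Python) =====
-- def load_rule(input0, output):
--     """Load a single enhancement rule.
--     A dict mapping all matching input patterns to the given output
--     pattern is returned.
--     """
--     result = {input0: output}
--     g = input0.split('/')
--     n = len(g)
--     if n in (2, 3):
--         m = n - 1
--         # Closed-form D4 transform table: each entry maps a target cell (r, c)
--         # to the source cell of the original grid (no iterated rotation state).
--         # Entries are rot^k, vflip*rot^k, hflip*rot^k for k = 1, 2, 3,
--         # precomposed into single coordinate maps.
--         maps = [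
--             lambda r, c: (c, m - r),      # rot
--             lambda r, c: (c, r),          # vflip*rot  = transpose
--             lambda r, c: (m - c, m - r),  # hflip*rot  = anti-transpose
--             lambda r, c: (m - r, m - c),  # rot^2
--             lambda r, c: (r, m - c),      # vflip*rot^2 = reverse each row
--             lambda r, c: (m - r, c),      # hflip*rot^2 = reverse the rows
--             lambda r, c: (m - c, r),      # rot^3
--             lambda r, c: (m - c, m - r),  # vflip*rot^3 = anti-transpose
--             lambda r, c: (c, r),          # hflip*rot^3 = transpose
--         ]
--         for f in maps:
--             key = '/'.join(''.join(g[f(r, c)[0]][f(r, c)[1]] for c in range(n))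
--                            for r in range(n))
--             result[key] = output
--     return result
-- ===== Notes on version B (the rewrite author's own statement) =====
-- stated objective: simpler
-- what changed: A chains three in-place rotations and derives the flips from the rotated intermediate each iteration; B has no rotation loop or mutable grid state at all: it applies a fixed closed-form table of D4 coordinate maps (rot^k, vflip*rot^k, hflip*rot^k precomposed) directly to the original grid and inserts the keys in the same order.
import Mathlib
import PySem

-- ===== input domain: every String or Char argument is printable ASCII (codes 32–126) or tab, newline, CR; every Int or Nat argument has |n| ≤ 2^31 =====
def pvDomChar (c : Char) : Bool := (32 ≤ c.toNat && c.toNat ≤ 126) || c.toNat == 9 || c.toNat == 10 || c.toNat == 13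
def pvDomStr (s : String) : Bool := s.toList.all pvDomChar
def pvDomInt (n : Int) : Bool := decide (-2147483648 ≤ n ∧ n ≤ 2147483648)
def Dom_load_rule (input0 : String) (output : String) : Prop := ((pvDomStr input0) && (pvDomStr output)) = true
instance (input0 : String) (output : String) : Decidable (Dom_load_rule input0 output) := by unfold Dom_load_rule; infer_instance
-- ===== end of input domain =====

-- B replaces A's iterated rotate-then-flip loop by a closed-form table of D4 coordinate maps applied directly to the original grid (simpler); same return value wherever A returns.

-- ===== PORT A =====
-- s[i] for a single char; exact under Pre_ (IndexError inputs are excluded by Pre_load_rule)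
def pvChAt (s : String) (i : Int) : Char := (PySem.Str.pyGet? s i).getD ' '
-- g[i] for a list of row strings; indices used are always in range here
def pvRowAt (g : List String) (i : Int) : String := (PySem.List.pyGet? g i).getD ""
def load_rule (input0 : String) (output : String) : List (String × String) :=
  let result : PySem.Dict String String := (PySem.Dict.empty).insert input0 output
  let pix := (PySem.Str.split? input0 "/").getD []
  if pix.length = 2 then
    (((List.range 3).foldl (fun (st : List String × PySem.Dict String String) _ =>
      let pix := [String.ofList [pvChAt (pvRowAt st.1 0) 1, pvChAt (pvRowAt st.1 1) 1],
                  String.ofList [pvChAt (pvRowAt st.1 0) 0, pvChAt (pvRowAt st.1 1) 0]]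
      let r1 := st.2.insert (PySem.Str.join "/" pix) output
      let vflip := [String.ofList [pvChAt (pvRowAt pix 1) 0, pvChAt (pvRowAt pix 1) 1],
                    String.ofList [pvChAt (pvRowAt pix 0) 0, pvChAt (pvRowAt pix 0) 1]]
      let r2 := r1.insert (PySem.Str.join "/" vflip) output
      let hflip := [String.ofList [pvChAt (pvRowAt pix 0) 1, pvChAt (pvRowAt pix 0) 0],
                    String.ofList [pvChAt (pvRowAt pix 1) 1, pvChAt (pvRowAt pix 1) 0]]
      let r3 := r2.insert (PySem.Str.join "/" hflip) output
      (pix, r3)) (pix, result)).2).items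
  else if pix.length = 3 then
    (((List.range 3).foldl (fun (st : List String × PySem.Dict String String) _ =>
      let pix := [String.ofList [pvChAt (pvRowAt st.1 0) 2, pvChAt (pvRowAt st.1 1) 2, pvChAt (pvRowAt st.1 2) 2],
                  String.ofList [pvChAt (pvRowAt st.1 0) 1, pvChAt (pvRowAt st.1 1) 1, pvChAt (pvRowAt st.1 2) 1],
                  String.ofList [pvChAt (pvRowAt st.1 0) 0, pvChAt (pvRowAt st.1 1) 0, pvChAt (pvRowAt st.1 2) 0]]
      let r1 := st.2.insert (PySem.Str.join "/" pix) output
      let vflip := [String.ofList [pvChAt (pvRowAt pix 2) 0, pvChAt (pvRowAt pix 2) 1, pvChAt (pvRowAt pix 2) 2],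
                    String.ofList [pvChAt (pvRowAt pix 1) 0, pvChAt (pvRowAt pix 1) 1, pvChAt (pvRowAt pix 1) 2],
                    String.ofList [pvChAt (pvRowAt pix 0) 0, pvChAt (pvRowAt pix 0) 1, pvChAt (pvRowAt pix 0) 2]]
      let r2 := r1.insert (PySem.Str.join "/" vflip) output
      let hflip := [String.ofList [pvChAt (pvRowAt pix 0) 2, pvChAt (pvRowAt pix 0) 1, pvChAt (pvRowAt pix 0) 0],
                    String.ofList [pvChAt (pvRowAt pix 1) 2, pvChAt (pvRowAt pix 1) 1, pvChAt (pvRowAt pix 1) 0],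
                    String.ofList [pvChAt (pvRowAt pix 2) 2, pvChAt (pvRowAt pix 2) 1, pvChAt (pvRowAt pix 2) 0]]
      let r3 := r2.insert (PySem.Str.join "/" hflip) output
      (pix, r3)) (pix, result)).2).items
  else result.items

-- ===== PORT B =====
-- '/'-join of the grid read through one coordinate map f : target cell -> source cell
def pvXform (n : Nat) (g : List String) (f : Nat → Nat → Nat × Nat) : String :=
  PySem.Str.join "/" ((List.range n).map (fun r =>
    String.ofList ((List.range n).map (fun c => pvChAt (pvRowAt g ((f r c).1 : Int)) ((f r c).2 : Int)))))
def load_rule_alt (input0 : String) (output : String) : List (String × String) :=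
  let result : PySem.Dict String String := (PySem.Dict.empty).insert input0 output
  let g := (PySem.Str.split? input0 "/").getD []
  let n := g.length
  if n = 2 ∨ n = 3 then
    let m := n - 1
    -- closed-form D4 transform table: rot^k, vflip∘rot^k, hflip∘rot^k for k = 1, 2, 3
    let maps : List (Nat → Nat → Nat × Nat) :=
      [fun r c => (c, m - r), fun r c => (c, r), fun r c => (m - c, m - r),
       fun r c => (m - r, m - c), fun r c => (r, m - c), fun r c => (m - r, c),
       fun r c => (m - c, r), fun r c => (m - c, m - r), fun r c => (c, r)]
    (maps.foldl (fun (d : PySem.Dict String String) f => d.insert (pvXform n g f) output) result).items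
  else result.items

-- ===== PRECONDITION & SPEC =====
-- Pre_ excludes exactly the inputs where Python A raises IndexError: a 2-row (resp. 3-row)
-- pattern containing a row shorter than 2 (resp. 3) characters.
def Pre_load_rule (input0 : String) (output : String) : Prop :=
  (let g := (PySem.Str.split? input0 "/").getD []
   ((g.length = 2 → ∀ r ∈ g, 2 ≤ PySem.Str.len r) ∧
    (g.length = 3 → ∀ r ∈ g, 3 ≤ PySem.Str.len r)))
instance (input0 : String) (output : String) : Decidable (Pre_load_rule input0 output) := by unfold Pre_load_rule; infer_instance
def pvWitness_load_rule : String × String := ("ab/cd", "x/y")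
def Spec_load_rule (input0 : String) (output : String) (out : List (String × String)) : Prop := out = load_rule_alt input0 output
instance (input0 : String) (output : String) (out : List (String × String)) : Decidable (Spec_load_rule input0 output out) := by unfold Spec_load_rule; infer_instance

-- ===== CLAIM (what is proved, stated in full; the proofs are below) =====
def Claim_equal_load_rule : Prop := ∀ (input0 : String) (output : String), Dom_load_rule input0 output → Pre_load_rule input0 output → Spec_load_rule input0 output (load_rule input0 output)

-- ===== LEMMAS AND PROOFS =====

-- The two ports agree on every input: case split on the shape of input0.split('/');
-- for 2 and 3 rows both sides reduce to the same sequence of dict insertions.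
theorem pv_main_eq (i o : String) : load_rule i o = load_rule_alt i o := by
  unfold load_rule load_rule_alt
  rcases hs : (PySem.Str.split? i "/").getD [] with _ | ⟨a, _ | ⟨b, _ | ⟨c, _ | t⟩⟩⟩ <;>
    simp [pvXform, pvRowAt, pvChAt, PySem.List.pyGet?, PySem.List.pyIdx?, List.range_succ]

-- ===== VERDICT (by name: the statement is the Claim_ definition above) =====
theorem load_rule_spec : Claim_equal_load_rule := by
  intro i o _ _
  unfold Spec_load_rule
  exact pv_main_eq i o
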